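-- pv_equiv track=rewrite | github.com/gboyegadada/algos | AoC15/day6.py | update_range
-- ===== SOURCE A (Python) =====
-- def update_range(c1: tuple, c2: tuple, g: dict, s: int):
--   for x in range(c1[0], c2[0]+1):
--     for y in range(c1[1], c2[1]+1):
--
--       # :if we are to "turn off" or "toggle" a light that used to be "on"
--       if (0 == s or 2 == s) and (x, y) in g:
--         del g[(x, y)] # Remove positions where light is "off"
--
--       # :if we are to "turn on" or "toggle" a light that used to be "off"
--       elif 1 == s or (2 == s and (x, y) not in g):
--         g[(x, y)] = True # Set positions where light is "on"
--
--   return g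
-- ===== SOURCE B (Python) =====
-- def update_range(c1: tuple, c2: tuple, g: dict, s: int):
--     # Rebuild the dict from g itself: one pass over g with an interval
--     # predicate decides which existing entries survive (deletion never
--     # enumerates the rectangle), then only the rectangle cells absent
--     # from g are appended; unknown instructions leave g untouched.
--     if s not in (0, 1, 2):
--         return g
--     x0, y0 = c1[0], c1[1]
--     x1, y1 = c2[0], c2[1]
--
--     def inside(c):
--         return x0 <= c[0] <= x1 and y0 <= c[1] <= y1
--
--     if s == 1:
--         kept = {c: (True if inside(c) else v) for c, v in g.items()}
--     else:  # 0 = turn off, 2 = toggle: entries inside the rectangle go away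
--         kept = {c: v for c, v in g.items() if not inside(c)}
--     if s == 0:
--         new = []
--     else:
--         new = [(x, y) for x in range(x0, x1 + 1)
--                       for y in range(y0, y1 + 1) if (x, y) not in g]
--     g.clear()
--     g.update(kept)
--     for c in new:
--         g[c] = True
--     return g
-- ===== Notes on version B (the rewrite author's own statement) =====
-- stated objective: alternative
-- what changed: B never walks the rectangle to delete: it rebuilds the dict from g in one pass using an interval predicate (entries inside the rectangle are dropped for s=0/2 or forced True for s=1) and then appends only the rectangle cells absent from g; for s=0 this is O(|g|) instead of O(W*H), and unknown s returns g without touching the rectangle at all.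
import Mathlib
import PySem

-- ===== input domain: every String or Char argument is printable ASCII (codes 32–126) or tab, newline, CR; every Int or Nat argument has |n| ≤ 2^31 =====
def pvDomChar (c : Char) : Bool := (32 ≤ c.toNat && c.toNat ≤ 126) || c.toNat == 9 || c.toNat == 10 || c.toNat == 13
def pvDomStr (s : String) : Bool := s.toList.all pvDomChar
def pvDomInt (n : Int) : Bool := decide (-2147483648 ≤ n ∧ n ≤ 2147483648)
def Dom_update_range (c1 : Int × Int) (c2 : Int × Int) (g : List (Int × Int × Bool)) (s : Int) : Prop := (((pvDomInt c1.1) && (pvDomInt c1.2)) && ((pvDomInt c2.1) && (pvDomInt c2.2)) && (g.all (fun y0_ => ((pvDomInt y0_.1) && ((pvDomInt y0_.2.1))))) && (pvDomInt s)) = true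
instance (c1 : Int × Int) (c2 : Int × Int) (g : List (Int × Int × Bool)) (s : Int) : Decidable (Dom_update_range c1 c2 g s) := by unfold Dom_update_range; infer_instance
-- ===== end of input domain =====

-- B rebuilds the dict from g itself (one pass with an interval predicate deciding
-- which entries survive, then only the absent rectangle cells appended) instead of
-- A's per-cell walk of the rectangle; the equivalence is about the returned dict —
-- both Pythons mutate g in place into the same final state.

-- ===== PORT A =====
def update_range (c1 : Int × Int) (c2 : Int × Int) (g : List (Int × Int × Bool)) (s : Int) : List (Int × Int × Bool) :=
  -- the Python dict keyed by pairs, as PySem.Dict ((x, y, b) ↔ ((x, y), b))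
  let d0 : PySem.Dict (Int × Int) Bool := PySem.Dict.mk (g.map (fun p => ((p.1, p.2.1), p.2.2)))
  let d :=
    (PySem.List.pyRange c1.1 (c2.1 + 1) 1).foldl (fun d x =>
      (PySem.List.pyRange c1.2 (c2.2 + 1) 1).foldl (fun d y =>
        if (s == 0 || s == 2) && d.contains (x, y) then d.erase (x, y)
        else if s == 1 || (s == 2 && !d.contains (x, y)) then d.insert (x, y) true
        else d) d) d0
  d.items.map (fun p => (p.1.1, p.1.2, p.2))

-- ===== PORT B =====
-- inside(c): the interval predicate of Source B
def pvInside (c1 : Int × Int) (c2 : Int × Int) (c : Int × Int) : Bool :=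
  decide (c1.1 ≤ c.1 ∧ c.1 ≤ c2.1) && decide (c1.2 ≤ c.2 ∧ c.2 ≤ c2.2)

-- the rectangle comprehension of Source B (only cells not already in g are kept)
def pvRect (c1 : Int × Int) (c2 : Int × Int) : List (Int × Int) :=
  (PySem.List.pyRange c1.1 (c2.1 + 1) 1).flatMap (fun x =>
    (PySem.List.pyRange c1.2 (c2.2 + 1) 1).map (fun y => (x, y)))

def update_range_alt (c1 : Int × Int) (c2 : Int × Int) (g : List (Int × Int × Bool)) (s : Int) : List (Int × Int × Bool) :=
  if !(s == 0 || s == 1 || s == 2) then g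
  else
    let d : PySem.Dict (Int × Int) Bool := PySem.Dict.mk (g.map (fun p => ((p.1, p.2.1), p.2.2)))
    -- kept = dict comprehension over g.items()
    let kept : List ((Int × Int) × Bool) :=
      if s == 1 then d.items.map (fun p => (p.1, if pvInside c1 c2 p.1 then true else p.2))
      else d.items.filter (fun p => !pvInside c1 c2 p.1)
    -- new = rectangle cells absent from g
    let newCells : List (Int × Int) :=
      if s == 0 then []
      else (pvRect c1 c2).filter (fun c => !d.contains c)
    -- g.clear(); g.update(kept); then append the new cells with value True
    let d' := newCells.foldl (fun d c => d.insert c true) (PySem.Dict.mk kept)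
    d'.items.map (fun p => (p.1.1, p.1.2, p.2))

-- ===== PRECONDITION & SPEC =====
def Spec_update_range (c1 : Int × Int) (c2 : Int × Int) (g : List (Int × Int × Bool)) (s : Int) (out : List (Int × Int × Bool)) : Prop := out = update_range_alt c1 c2 g s
instance (c1 : Int × Int) (c2 : Int × Int) (g : List (Int × Int × Bool)) (s : Int) (out : List (Int × Int × Bool)) : Decidable (Spec_update_range c1 c2 g s out) := by unfold Spec_update_range; infer_instance

-- ===== CLAIM (what is proved, stated in full; the proofs are below) =====
def Claim_equal_update_range : Prop := ∀ (c1 : Int × Int) (c2 : Int × Int) (g : List (Int × Int × Bool)) (s : Int), Dom_update_range c1 c2 g s → Spec_update_range c1 c2 g s (update_range c1 c2 g s)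

-- ===== LEMMAS AND PROOFS =====

theorem mem_pvRect {c1 c2 : Int × Int} {c : Int × Int} :
    c ∈ pvRect c1 c2 ↔ pvInside c1 c2 c = true := by
  unfold pvRect pvInside
  simp only [List.mem_flatMap, List.mem_map, PySem.List.mem_pyRange_one]
  constructor
  · rintro ⟨x, ⟨hx1, hx2⟩, y, ⟨hy1, hy2⟩, rfl⟩
    simp; omega
  · intro h
    simp only [Bool.and_eq_true, decide_eq_true_eq] at h
    exact ⟨c.1, ⟨h.1.1, by omega⟩, c.2, ⟨h.2.1, by omega⟩, rfl⟩

theorem pvRect_nodup (c1 c2 : Int × Int) : (pvRect c1 c2).Nodup :=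
  List.Nodup.product (PySem.List.nodup_pyRange_one _ _) (PySem.List.nodup_pyRange_one _ _)

theorem contains_erase_of_ne {d : PySem.Dict (Int × Int) Bool} {k k' : Int × Int}
    (h : k' ≠ k) : (d.erase k).contains k' = d.contains k' := by
  apply Bool.eq_iff_iff.mpr
  simp only [PySem.Dict.contains, PySem.Dict.erase, List.any_eq_true, List.mem_filter,
    beq_iff_eq, Bool.not_eq_eq_eq_not, Bool.not_true]
  constructor
  · rintro ⟨p, ⟨hp, -⟩, hk⟩; exact ⟨p, hp, hk⟩
  · rintro ⟨p, hp, hk⟩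
    exact ⟨p, ⟨hp, by simp [hk, h]⟩, hk⟩

theorem contains_insert_of_ne {d : PySem.Dict (Int × Int) Bool} {k k' : Int × Int}
    {v : Bool} (h : k' ≠ k) : (d.insert k v).contains k' = d.contains k' := by
  rw [PySem.Dict.contains_insert]
  simp [h]

theorem erase_of_not_contains {d : PySem.Dict (Int × Int) Bool} {k : Int × Int}
    (h : d.contains k = false) : d.erase k = d := by
  apply PySem.Dict.ext
  simp only [PySem.Dict.erase]
  apply List.filter_eq_self.mpr
  intro p hp
  simp only [PySem.Dict.contains, List.any_eq_false] at h
  simp [h p hp]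

theorem erase_insert_comm {d : PySem.Dict (Int × Int) Bool} {k c : Int × Int}
    {v : Bool} (h : k ≠ c) : (d.insert c v).erase k = (d.erase k).insert c v := by
  have hck : (c == k) = false := beq_eq_false_iff_ne.mpr (fun he => h he.symm)
  apply PySem.Dict.ext
  by_cases hc : d.contains c = true
  · have hc' : (d.erase k).contains c = true := by
      rw [contains_erase_of_ne (fun he => h he.symm)]; exact hc
    rw [PySem.Dict.items_insert_of_contains _ _ hc']
    have hL : ((d.insert c v).erase k).items
        = List.filter (fun p => !p.1 == k) (d.insert c v).items := rfl
    rw [hL, PySem.Dict.items_insert_of_contains _ _ hc]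
    have hE : (d.erase k).items = List.filter (fun p => !p.1 == k) d.items := rfl
    rw [hE, List.filter_map]
    apply congrArg
    apply List.filter_congr
    intro p _
    by_cases hp : (p.1 == c) = true
    · have hp' : p.1 = c := beq_iff_eq.mp hp
      simp [Function.comp, hp']
    · simp [Function.comp, hp]
  · have hcf : d.contains c = false := by simpa using hc
    have hc' : (d.erase k).contains c = false := by
      rw [contains_erase_of_ne (fun he => h he.symm)]; exact hcf
    rw [PySem.Dict.items_insert_of_not_contains _ _ hc']
    have hL : ((d.insert c v).erase k).items
        = List.filter (fun p => !p.1 == k) (d.insert c v).items := rfl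
    rw [hL, PySem.Dict.items_insert_of_not_contains _ _ hcf, List.filter_append]
    have hE : (d.erase k).items = List.filter (fun p => !p.1 == k) d.items := rfl
    simp [hE, hck]

theorem foldl_erase_insert_comm (l : List (Int × Int)) :
    ∀ (d : PySem.Dict (Int × Int) Bool) (c : Int × Int) (v : Bool), (∀ k ∈ l, k ≠ c) →
    l.foldl (fun d k => d.erase k) (d.insert c v)
      = (l.foldl (fun d k => d.erase k) d).insert c v := by
  induction l with
  | nil => intro d c v _; rfl
  | cons k t ih =>
    intro d c v h
    simp only [List.foldl_cons]
    rw [erase_insert_comm (h k (by simp)), ih]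
    intro k' hk'; exact h k' (by simp [hk'])

theorem toggle_split (l : List (Int × Int)) :
    ∀ (d d0 : PySem.Dict (Int × Int) Bool), l.Nodup →
    (∀ c ∈ l, d.contains c = d0.contains c) →
    l.foldl (fun d c => if d.contains c then d.erase c else d.insert c true) d
      = (l.filter (fun c => !d0.contains c)).foldl (fun d c => d.insert c true)
          ((l.filter (fun c => d0.contains c)).foldl (fun d c => d.erase c) d) := by
  induction l with
  | nil => intro d d0 _ _; rfl
  | cons c t ih =>
    intro d d0 hnd h
    have hct : c ∉ t := (List.nodup_cons.mp hnd).1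
    have hnt : t.Nodup := (List.nodup_cons.mp hnd).2
    have hc0 : d.contains c = d0.contains c := h c (by simp)
    by_cases hc : d0.contains c = true
    · have hf1 : List.filter (fun c => d0.contains c) (c :: t)
          = c :: List.filter (fun c => d0.contains c) t := by
        simp [hc]
      have hf2 : List.filter (fun c => !d0.contains c) (c :: t)
          = List.filter (fun c => !d0.contains c) t := by
        simp [hc]
      rw [hf1, hf2, List.foldl_cons, List.foldl_cons, if_pos (by rw [hc0]; exact hc)]
      apply ih _ d0 hnt
      intro c' hc'
      rw [contains_erase_of_ne (fun he => hct (by rw [← he]; exact hc'))]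
      exact h c' (by simp [hc'])
    · have hcf : d.contains c = false := by rw [hc0]; simpa using hc
      have hf1 : List.filter (fun c => d0.contains c) (c :: t)
          = List.filter (fun c => d0.contains c) t := by
        simp [hc]
      have hf2 : List.filter (fun c => !d0.contains c) (c :: t)
          = c :: List.filter (fun c => !d0.contains c) t := by
        simp [hc]
      rw [hf1, hf2, List.foldl_cons, List.foldl_cons, if_neg (by simp [hcf])]
      rw [ih _ d0 hnt ?hmem]
      case hmem =>
        intro c' hc'
        rw [contains_insert_of_ne (fun he => hct (by rw [← he]; exact hc'))]
        exact h c' (by simp [hc'])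
      rw [foldl_erase_insert_comm]
      intro k hk
      exact fun he => hct (by rw [← he]; exact (List.mem_filter.mp hk).1)

-- erasing every key of l leaves exactly the items whose key is not in l
theorem foldl_erase_items (l : List (Int × Int)) :
    ∀ (d : PySem.Dict (Int × Int) Bool),
    (l.foldl (fun d k => d.erase k) d).items
      = d.items.filter (fun p => !l.any (fun k => p.1 == k)) := by
  induction l with
  | nil => intro d; simp
  | cons k t ih =>
    intro d
    simp only [List.foldl_cons]
    rw [ih]
    have hE : (d.erase k).items = List.filter (fun p => !p.1 == k) d.items := rfl
    rw [hE, List.filter_filter]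
    apply List.filter_congr
    intro p _
    simp only [List.any_cons]
    cases h : (p.1 == k) <;> simp

-- inserting True at every key of a Nodup list: existing entries are overwritten in
-- place, fresh keys are appended in list order
theorem foldl_insert_true_items (l : List (Int × Int)) :
    ∀ (d : PySem.Dict (Int × Int) Bool), l.Nodup →
    (l.foldl (fun d c => d.insert c true) d).items
      = d.items.map (fun p => (p.1, if l.any (fun c => p.1 == c) then true else p.2))
        ++ (l.filter (fun c => !d.contains c)).map (fun c => (c, true)) := by
  induction l with
  | nil => intro d _; simp
  | cons c t ih =>
    intro d hnd
    have hct : c ∉ t := (List.nodup_cons.mp hnd).1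
    have hnt : t.Nodup := (List.nodup_cons.mp hnd).2
    simp only [List.foldl_cons]
    rw [ih _ hnt]
    have hcont : ∀ x ∈ t, (d.insert c true).contains x = d.contains x := by
      intro x hx
      exact contains_insert_of_ne (fun he => hct (he ▸ hx))
    have hfilter : t.filter (fun x => !(d.insert c true).contains x)
        = t.filter (fun x => !d.contains x) := by
      apply List.filter_congr
      intro x hx; rw [hcont x hx]
    rw [hfilter]
    by_cases hc : d.contains c = true
    · rw [PySem.Dict.items_insert_of_contains _ _ hc, List.map_map]
      have hf : List.filter (fun x => !d.contains x) (c :: t)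
          = List.filter (fun x => !d.contains x) t := by simp [hc]
      rw [hf]
      congr 1
      apply List.map_congr_left
      intro p _
      simp only [Function.comp, List.any_cons]
      by_cases hp : (p.1 == c) = true
      · have : p.1 = c := beq_iff_eq.mp hp
        simp [this]
      · simp only [Bool.not_eq_true] at hp
        simp [hp]
    · have hcf : d.contains c = false := by simpa using hc
      have hf : List.filter (fun x => !d.contains x) (c :: t)
          = c :: List.filter (fun x => !d.contains x) t := by simp [hcf]
      have hmap : d.items.map (fun p => (p.1, if t.any (fun x => p.1 == x) then true else p.2))
          = d.items.map (fun p => (p.1, if (c :: t).any (fun x => p.1 == x) then true else p.2)) := by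
        apply List.map_congr_left
        intro p hp
        have h' := hcf
        simp only [PySem.Dict.contains, List.any_eq_false] at h'
        have hnec : (p.1 == c) = false := by simpa using h' p hp
        simp [hnec]
      rw [PySem.Dict.items_insert_of_not_contains _ _ hcf, List.map_append, hf,
        List.map_cons, hmap]
      simp [ite_self]

-- a key occurring in d.items satisfies contains
theorem contains_of_mem_items {d : PySem.Dict (Int × Int) Bool} {p : (Int × Int) × Bool}
    (hp : p ∈ d.items) : d.contains p.1 = true := by
  simp only [PySem.Dict.contains, List.any_eq_true]
  exact ⟨p, hp, by simp⟩

-- a key is hit by the rectangle cell list exactly when the interval predicate holds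
theorem any_rect (c1 c2 : Int × Int) (a : Int × Int) :
    (pvRect c1 c2).any (fun k => a == k) = pvInside c1 c2 a := by
  apply Bool.eq_iff_iff.mpr
  simp only [List.any_eq_true, beq_iff_eq]
  constructor
  · rintro ⟨k, hk, rfl⟩; exact mem_pvRect.mp hk
  · intro h; exact ⟨a, mem_pvRect.mpr h, rfl⟩

theorem foldl_dict_fixed (l : List Int) (d : PySem.Dict (Int × Int) Bool) :
    List.foldl (fun (d : PySem.Dict (Int × Int) Bool) (_ : Int) => d) d l = d :=
  List.foldl_fixed l

-- A's nested loops are the single fold over the rectangle cell list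
theorem nested_eq_rect_fold (c1 c2 : Int × Int) (f : PySem.Dict (Int × Int) Bool → (Int × Int) → PySem.Dict (Int × Int) Bool) (d : PySem.Dict (Int × Int) Bool) :
    (PySem.List.pyRange c1.1 (c2.1 + 1) 1).foldl (fun d x =>
      (PySem.List.pyRange c1.2 (c2.2 + 1) 1).foldl (fun d y => f d (x, y)) d) d
      = (pvRect c1 c2).foldl f d := by
  unfold pvRect
  rw [List.foldl_flatMap]
  simp [List.foldl_map]

-- ===== VERDICT (by name: the statement is the Claim_ definition above) =====
theorem update_range_spec : Claim_equal_update_range := by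
  intro c1 c2 g s _
  unfold Spec_update_range update_range update_range_alt
  simp only []
  by_cases hs0 : s = 0
  · subst hs0
    rw [if_neg (by decide)]
    simp only [if_pos (show ((0:Int) == 0) = true from rfl), List.foldl_nil]
    set d0 : PySem.Dict (Int × Int) Bool := PySem.Dict.mk (g.map (fun p => ((p.1, p.2.1), p.2.2))) with hd0
    have hb : ∀ (d : PySem.Dict (Int × Int) Bool) (c : Int × Int),
        (if (((0:Int) == 0 || (0:Int) == 2) && d.contains c) = true then d.erase c
         else if ((0:Int) == 1 || ((0:Int) == 2 && !d.contains c)) = true then d.insert c true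
         else d) = d.erase c := by
      intro d c
      by_cases hc : d.contains c = true
      · simp [hc]
      · have hcf : d.contains c = false := by simpa using hc
        simp [hcf, erase_of_not_contains hcf]
    rw [nested_eq_rect_fold c1 c2 (fun d c =>
        if (((0:Int) == 0 || (0:Int) == 2) && d.contains c) = true then d.erase c
        else if ((0:Int) == 1 || ((0:Int) == 2 && !d.contains c)) = true then d.insert c true
        else d) d0]
    have : (pvRect c1 c2).foldl (fun d c =>
        if (((0:Int) == 0 || (0:Int) == 2) && d.contains c) = true then d.erase c
        else if ((0:Int) == 1 || ((0:Int) == 2 && !d.contains c)) = true then d.insert c true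
        else d) d0 = (pvRect c1 c2).foldl (fun d c => d.erase c) d0 := by
      apply PySem.List.foldl_congr_mem
      intro d c _
      exact hb d c
    rw [this, foldl_erase_items,
      if_neg (show ¬(((0:Int) == 1) = true) by decide)]
    have hfilt : d0.items.filter (fun p => !(pvRect c1 c2).any (fun k => p.1 == k))
        = d0.items.filter (fun p => !pvInside c1 c2 p.1) :=
      List.filter_congr (fun p _ => by rw [any_rect])
    rw [hfilt]
  · by_cases hs1 : s = 1
    · subst hs1
      rw [if_neg (by decide)]
      set d0 : PySem.Dict (Int × Int) Bool := PySem.Dict.mk (g.map (fun p => ((p.1, p.2.1), p.2.2))) with hd0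
      rw [nested_eq_rect_fold c1 c2 (fun d c =>
          if (((1:Int) == 0 || (1:Int) == 2) && d.contains c) = true then d.erase c
          else if ((1:Int) == 1 || ((1:Int) == 2 && !d.contains c)) = true then d.insert c true
          else d) d0]
      have hstep : (pvRect c1 c2).foldl (fun d c =>
          if (((1:Int) == 0 || (1:Int) == 2) && d.contains c) = true then d.erase c
          else if ((1:Int) == 1 || ((1:Int) == 2 && !d.contains c)) = true then d.insert c true
          else d) d0 = (pvRect c1 c2).foldl (fun d c => d.insert c true) d0 := by
        apply PySem.List.foldl_congr_mem
        intro d c _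
        simp
      rw [hstep,
        if_pos (show ((1:Int) == 1) = true by decide),
        if_neg (show ¬(((1:Int) == 0) = true) by decide)]
      apply congrArg
      rw [foldl_insert_true_items _ _ (pvRect_nodup c1 c2),
        foldl_insert_true_items _ _ ((pvRect_nodup c1 c2).filter _)]
      have hcontmk : ∀ c, (PySem.Dict.mk (d0.items.map (fun p => (p.1, if pvInside c1 c2 p.1 then true else p.2)))
            : PySem.Dict (Int × Int) Bool).contains c = d0.contains c := by
        intro c
        show ((d0.items.map (fun p => (p.1, if pvInside c1 c2 p.1 then true else p.2))).any
          (fun p => p.1 == c)) = d0.items.any (fun p => p.1 == c)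
        rw [List.any_map]
        rfl
      have hA : (d0.items.map (fun p => (p.1, if pvInside c1 c2 p.1 then true else p.2))).map
            (fun p => (p.1, if ((pvRect c1 c2).filter (fun c => !d0.contains c)).any (fun c => p.1 == c) then true else p.2))
          = d0.items.map (fun p => (p.1, if (pvRect c1 c2).any (fun c => p.1 == c) then true else p.2)) := by
        rw [List.map_map]
        apply List.map_congr_left
        intro p hp
        have hc : d0.contains p.1 = true := contains_of_mem_items hp
        have hany : ((pvRect c1 c2).filter (fun c => !d0.contains c)).any (fun c => p.1 == c) = false := by
          apply List.any_eq_false.mpr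
          intro x hx hbeq
          rcases List.mem_filter.mp hx with ⟨-, hxc⟩
          rw [beq_iff_eq.mp hbeq] at hc
          simp [hc] at hxc
        simp only [Function.comp, hany, any_rect, Bool.false_eq_true, if_false]
      have hB : ((pvRect c1 c2).filter (fun c => !d0.contains c)).filter
            (fun c => !(PySem.Dict.mk (d0.items.map (fun p => (p.1, if pvInside c1 c2 p.1 then true else p.2)))
              : PySem.Dict (Int × Int) Bool).contains c)
          = (pvRect c1 c2).filter (fun c => !d0.contains c) := by
        apply List.filter_eq_self.mpr
        intro x hx
        rw [hcontmk x]
        exact (List.mem_filter.mp hx).2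
      congr 1
      · exact hA.symm
      · rw [hB]
    · by_cases hs2 : s = 2
      · subst hs2
        rw [if_neg (by decide)]
        set d0 : PySem.Dict (Int × Int) Bool := PySem.Dict.mk (g.map (fun p => ((p.1, p.2.1), p.2.2))) with hd0
        rw [nested_eq_rect_fold c1 c2 (fun d c =>
            if (((2:Int) == 0 || (2:Int) == 2) && d.contains c) = true then d.erase c
            else if ((2:Int) == 1 || ((2:Int) == 2 && !d.contains c)) = true then d.insert c true
            else d) d0]
        have hstep : (pvRect c1 c2).foldl (fun d c =>
            if (((2:Int) == 0 || (2:Int) == 2) && d.contains c) = true then d.erase c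
            else if ((2:Int) == 1 || ((2:Int) == 2 && !d.contains c)) = true then d.insert c true
            else d) d0
            = (pvRect c1 c2).foldl (fun d c => if d.contains c then d.erase c else d.insert c true) d0 := by
          apply PySem.List.foldl_congr_mem
          intro d c _
          by_cases hc : d.contains c = true <;> simp [hc]
        rw [hstep, toggle_split _ _ _ (pvRect_nodup c1 c2) (fun _ _ => rfl)]
        -- erase prefix = dict of the kept items
        have herased : ((pvRect c1 c2).filter (fun c => d0.contains c)).foldl
              (fun d c => d.erase c) d0
            = PySem.Dict.mk (d0.items.filter (fun p => !pvInside c1 c2 p.1)) := by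
          apply PySem.Dict.ext
          rw [foldl_erase_items]
          show _ = d0.items.filter (fun p => !pvInside c1 c2 p.1)
          apply List.filter_congr
          intro p hp
          have hpc : d0.contains p.1 = true := contains_of_mem_items hp
          have : ((pvRect c1 c2).filter (fun c => d0.contains c)).any (fun k => p.1 == k)
              = pvInside c1 c2 p.1 := by
            apply Bool.eq_iff_iff.mpr
            simp only [List.any_eq_true, List.mem_filter, beq_iff_eq]
            constructor
            · rintro ⟨k, ⟨hk, -⟩, rfl⟩; exact mem_pvRect.mp hk
            · intro h; exact ⟨p.1, ⟨mem_pvRect.mpr h, hpc⟩, rfl⟩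
          rw [this]
        rw [herased]
        simp only [show ((2:Int) == 1) = false from rfl, show ((2:Int) == 0) = false from rfl,
          Bool.false_eq_true, if_false]
        rfl
      · have h0 : (s == 0) = false := by simp [hs0]
        have h1 : (s == 1) = false := by simp [hs1]
        have h2 : (s == 2) = false := by simp [hs2]
        rw [if_pos (by simp [h0, h1, h2])]
        have hb : ∀ (d : PySem.Dict (Int × Int) Bool) (x y : Int),
            (if ((s == 0 || s == 2) && d.contains (x, y)) = true then d.erase (x, y)
             else if (s == 1 || (s == 2 && !d.contains (x, y))) = true then d.insert (x, y) true
             else d) = d := by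
          intro d x y
          simp [h0, h1, h2]
        simp only [hb, foldl_dict_fixed]
        show List.map _ (List.map _ g) = g
        rw [List.map_map]
        exact List.map_id g
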